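-- pv_equiv track=rewrite | github.com/MySonIsZhaGou/BCH-ECC | precalculate.py | gf_mult_noLUT
-- ===== SOURCE A (Python) =====
-- def gf_mult_noLUT(x, y, prim=0x11d):
--     def cl_mult(x, y):
--         z = 0
--         i = 0
--         while (y >> i) > 0:
--             if y & (1 << i):
--                 z ^= x << i
--             i += 1
--         return z
--
--     def bit_length(n):
--         bits = 0
--         while n >> bits: bits += 1
--         return bits
--
--     def cl_div(dividend, divisor=None):
--         dl1 = bit_length(dividend)
--         dl2 = bit_length(divisor)
--         if dl1 < dl2:
--             return dividend
--         for i in range(dl1 - dl2, -1, -1):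
--             if dividend & (1 << i + dl2 - 1):
--                 dividend ^= divisor << i
--         return dividend
--     result = cl_mult(x, y)
--     if prim > 0:
--         result = cl_div(result, prim)
--
--     return result
-- ===== SOURCE B (Python) =====
-- def gf_mult_noLUT(x, y, prim=0x11d):
--     # Interleaved Russian-peasant multiply: reduce x modulo prim once, then
--     # keep the running multiplicand reduced after every shift, so no separate
--     # division pass over the full product is needed.
--     r = 0
--     if prim > 0 and y > 0:
--         deg = prim.bit_length() - 1
--         while (x >> deg) > 0:
--             x ^= prim << (x.bit_length() - 1 - deg)
--         while y > 0:
--             if y & 1: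
--                 r ^= x
--             y >>= 1
--             x <<= 1
--             if (x >> deg) & 1:
--                 x ^= prim
--     else:
--         while y > 0:
--             if y & 1:
--                 r ^= x
--             y >>= 1
--             x <<= 1
--     return r
-- ===== Notes on version B (the rewrite author's own statement) =====
-- stated objective: alternative
-- what changed: Instead of building the full carry-less product with an indexed while-loop and then long-dividing it by prim (cl_mult + cl_div), B runs a single Russian-peasant loop over the bits of y that XOR-accumulates a multiplicand kept reduced modulo prim at every shift (after reducing x once up front), so no full-width product or separate division pass ever exists.
-- outside the precondition, e.g. on gf_mult_noLUT(-1, 3, 5): A returns 1, B returns 4; on gf_mult_noLUT(-2, 1, 3): A does not finish within the time limit, B returns -2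
import Mathlib
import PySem

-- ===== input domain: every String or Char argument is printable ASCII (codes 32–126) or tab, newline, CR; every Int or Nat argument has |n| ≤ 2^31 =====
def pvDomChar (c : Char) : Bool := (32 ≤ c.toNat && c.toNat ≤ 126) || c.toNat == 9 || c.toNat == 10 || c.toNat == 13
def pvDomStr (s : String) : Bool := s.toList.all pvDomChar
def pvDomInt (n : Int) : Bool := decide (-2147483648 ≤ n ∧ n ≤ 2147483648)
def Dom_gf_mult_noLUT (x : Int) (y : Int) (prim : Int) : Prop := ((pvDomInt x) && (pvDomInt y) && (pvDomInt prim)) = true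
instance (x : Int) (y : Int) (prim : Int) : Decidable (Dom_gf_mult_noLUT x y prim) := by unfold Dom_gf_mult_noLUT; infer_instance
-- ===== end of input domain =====

-- B replaces A's build-full-product-then-long-divide structure by a single interleaved
-- Russian-peasant loop whose multiplicand is kept reduced modulo prim (objective: alternative).
-- Every while-loop below is ported with an explicit fuel argument as a totality device only:
-- at each call site the fuel strictly exceeds the loop's iteration count on every input on
-- which the Python loop terminates, so the guard, body and exit value are the Python's.

-- ===== PORT A =====

-- A's inner helper bit_length: `bits = 0; while n >> bits: bits += 1; return bits`.
-- (For n < 0 Python's loop never terminates; those inputs are excluded by Pre_.)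
def pvBitLenAux (n : Int) (bits : Nat) (fuel : Nat) : Nat :=
  match fuel with
  | 0 => bits
  | f + 1 => if 0 < n >>> bits then pvBitLenAux n (bits + 1) f else bits

-- A's inner helper cl_mult: `z = 0; i = 0; while (y >> i) > 0: if y & (1 << i): z ^= x << i; i += 1`.
def pvClMultAux (x y : Int) (i : Nat) (z : Int) (fuel : Nat) : Int :=
  match fuel with
  | 0 => z
  | f + 1 =>
    if 0 < y >>> i then
      pvClMultAux x y (i + 1)
        (if PySem.Int.band y ((1:Int) <<< i) ≠ 0 then PySem.Int.bxor z (x <<< i) else z) f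
    else z

-- A's inner helper cl_div, with dl1/dl2 its two bit_length calls and the descending
-- `for i in range(dl1 - dl2, -1, -1)` loop (`1 << i + dl2 - 1` parses as `1 << (i + dl2 - 1)`).
def pvClDiv (dividend divisor : Int) : Int :=
  let dl1 := pvBitLenAux dividend 0 (dividend.toNat + 1)
  let dl2 := pvBitLenAux divisor 0 (divisor.toNat + 1)
  if (dl1 : Int) < (dl2 : Int) then dividend
  else
    (PySem.List.pyRange ((dl1 : Int) - (dl2 : Int)) (-1) (-1)).foldl
      (fun d i =>
        if PySem.Int.band d ((1:Int) <<< (i + (dl2 : Int) - 1).toNat) ≠ 0 then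
          PySem.Int.bxor d (divisor <<< i.toNat)
        else d)
      dividend

def gf_mult_noLUT (x : Int) (y : Int) (prim : Int) : Int :=
  let result := pvClMultAux x y 0 0 (y.toNat + 1)
  if prim > 0 then pvClDiv result prim else result

-- ===== PORT B =====

-- B's pre-reduction loop: `while (x >> deg) > 0: x ^= prim << (x.bit_length() - 1 - deg)`.
def pvReduceX (x prim : Int) (fuel : Nat) : Int :=
  match fuel with
  | 0 => x
  | f + 1 =>
    if 0 < x >>> (PySem.Int.bitLength prim - 1) then
      pvReduceX
        (PySem.Int.bxor x (prim <<< (PySem.Int.bitLength x - 1 - (PySem.Int.bitLength prim - 1))))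
        prim f
    else x

-- B's main loop with inline reduction of the running multiplicand.
def pvLoopB (r x y prim : Int) (deg : Nat) (fuel : Nat) : Int :=
  match fuel with
  | 0 => r
  | f + 1 =>
    if 0 < y then
      pvLoopB (if PySem.Int.band y 1 ≠ 0 then PySem.Int.bxor r x else r)
        (let x1 := x <<< (1:Nat)
         if PySem.Int.band (x1 >>> deg) 1 ≠ 0 then PySem.Int.bxor x1 prim else x1)
        (y >>> (1:Nat)) prim deg f
    else r

-- B's plain loop (the `else` branch, no reduction).
def pvLoopNoRed (r x y : Int) (fuel : Nat) : Int :=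
  match fuel with
  | 0 => r
  | f + 1 =>
    if 0 < y then
      pvLoopNoRed (if PySem.Int.band y 1 ≠ 0 then PySem.Int.bxor r x else r)
        (x <<< (1:Nat)) (y >>> (1:Nat)) f
    else r

def gf_mult_noLUT_alt (x : Int) (y : Int) (prim : Int) : Int :=
  if 0 < prim ∧ 0 < y then
    pvLoopB 0 (pvReduceX x prim (x.toNat + 1)) y prim (PySem.Int.bitLength prim - 1) (y.toNat + 1)
  else pvLoopNoRed 0 x y (y.toNat + 1)

-- ===== PRECONDITION & SPEC =====

-- Pre_ excludes x < 0 with y > 0 and prim > 0: there A feeds a negative carry-less product to its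
-- hand-written bit_length, which either loops forever (infinite while) or, when the XOR of negative
-- shifts happens to be nonnegative, returns an accidental sign-dependent value B does not reproduce.
def Pre_gf_mult_noLUT (x : Int) (y : Int) (prim : Int) : Prop := 0 ≤ x ∨ y ≤ 0 ∨ prim ≤ 0
instance (x : Int) (y : Int) (prim : Int) : Decidable (Pre_gf_mult_noLUT x y prim) := by
  unfold Pre_gf_mult_noLUT; infer_instance

def pvWitness_gf_mult_noLUT : Int × Int × Int := (3, 5, 7)

def Spec_gf_mult_noLUT (x : Int) (y : Int) (prim : Int) (out : Int) : Prop :=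
  out = gf_mult_noLUT_alt x y prim
instance (x : Int) (y : Int) (prim : Int) (out : Int) : Decidable (Spec_gf_mult_noLUT x y prim out) := by
  unfold Spec_gf_mult_noLUT; infer_instance

-- ===== CLAIM (what is proved, stated in full; the proofs are below) =====
def Claim_equal_gf_mult_noLUT : Prop := ∀ (x : Int) (y : Int) (prim : Int), Dom_gf_mult_noLUT x y prim → Pre_gf_mult_noLUT x y prim → Spec_gf_mult_noLUT x y prim (gf_mult_noLUT x y prim)

-- ===== LEMMAS AND PROOFS =====

-- ---- general bit lemmas ----

theorem pvNat_testBit_of_bounds {m k : Nat} (h1 : 2 ^ k ≤ m) (h2 : m < 2 ^ (k+1)) :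
    m.testBit k = true := by
  rw [Nat.testBit_eq_decide_div_mod_eq]
  have hk : (0:Nat) < 2 ^ k := by positivity
  have hd1 : 1 ≤ m / 2 ^ k := (Nat.le_div_iff_mul_le hk).2 (by omega)
  have hd2 : m / 2 ^ k < 2 := (Nat.div_lt_iff_lt_mul hk).2 (by rw [pow_succ] at h2; omega)
  have : m / 2 ^ k = 1 := by omega
  simp [this]

theorem pvNat_lt_of_testBit_false {c k : Nat} (h : c < 2 ^ (k+1)) (hb : c.testBit k = false) :
    c < 2 ^ k := by
  have hk : (0:Nat) < 2 ^ k := by positivity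
  have hd2 : c / 2 ^ k < 2 := by
    rw [Nat.div_lt_iff_lt_mul hk]
    rw [pow_succ] at h
    omega
  have hv : c / 2 ^ k = 0 ∨ c / 2 ^ k = 1 := by
    revert hd2
    generalize c / 2 ^ k = v
    omega
  rcases hv with hv | hv
  · rcases Nat.div_eq_zero_iff.mp hv with h' | h'
    · omega
    · exact h'
  · exfalso
    have hle : 2 ^ k ≤ c := by
      have h1 : 1 ≤ c / 2 ^ k := by rw [hv]
      have := (Nat.le_div_iff_mul_le hk).mp h1
      omega
    rw [pvNat_testBit_of_bounds hle h] at hb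
    cases hb

theorem pvNat_cancel {a b k : Nat} (ha : a < 2 ^ (k+1)) (hb : b < 2 ^ (k+1))
    (ta : a.testBit k = true) (tb : b.testBit k = true) : a ^^^ b < 2 ^ k := by
  refine pvNat_lt_of_testBit_false (Nat.xor_lt_two_pow ha hb) ?_
  simp [Nat.testBit_xor, ta, tb]

theorem pvNat_top_bit {m : Nat} (hm : m ≠ 0) : m.testBit (m.size - 1) = true := by
  have hs : 0 < m.size := Nat.size_pos.2 (Nat.pos_of_ne_zero hm)
  have h1 : 2 ^ (m.size - 1) ≤ m := Nat.lt_size.mp (by omega)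
  have h2 : m < 2 ^ (m.size - 1 + 1) := by
    have := Nat.lt_size_self m
    have hss : m.size - 1 + 1 = m.size := by omega
    rw [hss]; exact this
  exact pvNat_testBit_of_bounds h1 h2

theorem pvNat_red_step {x p : Nat} (hp : p ≠ 0) (hx : 2 ^ (p.size - 1) ≤ x) :
    x ^^^ (p <<< (x.size - 1 - (p.size - 1))) < 2 ^ (x.size - 1) := by
  have hx0 : x ≠ 0 := by
    intro h; subst h
    have : (0:Nat) < 2 ^ (p.size - 1) := by positivity
    omega
  have hps : 0 < p.size := Nat.size_pos.2 (Nat.pos_of_ne_zero hp)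
  have hxs : 0 < x.size := Nat.size_pos.2 (Nat.pos_of_ne_zero hx0)
  have hsz : p.size ≤ x.size := by
    have : p.size - 1 < x.size := Nat.lt_size.mpr hx
    omega
  have hs : x.size - 1 - (p.size - 1) = x.size - p.size := by omega
  rw [hs]
  set s := x.size - p.size with hsdef
  have hk : x.size - 1 + 1 = x.size := by omega
  refine pvNat_cancel ?_ ?_ ?_ ?_
  · rw [hk]; exact Nat.lt_size_self x
  · rw [hk, Nat.shiftLeft_eq]
    calc p * 2 ^ s < 2 ^ p.size * 2 ^ s :=
          mul_lt_mul_of_pos_right (Nat.lt_size_self p) (by positivity)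
      _ = 2 ^ (p.size + s) := by rw [pow_add]
      _ ≤ 2 ^ x.size := Nat.pow_le_pow_right (by norm_num) (by omega)
  · exact pvNat_top_bit hx0
  · rw [Nat.testBit_shiftLeft]
    have h1 : x.size - 1 ≥ s := by omega
    have h2 : x.size - 1 - s = p.size - 1 := by omega
    simp [h1, h2, pvNat_top_bit hp]

theorem pvInt_shr_pos {v : Int} {k : Nat} (h : 0 < v >>> k) : 0 < v := by
  by_contra hc
  rw [Int.shiftRight_eq_div_pow] at h
  have h2 : v / (((2 ^ k : Nat)) : Int) ≤ 0 / (((2 ^ k : Nat)) : Int) :=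
    Int.ediv_le_ediv (by positivity) (by omega)
  push_cast at h h2
  simp at h2
  omega

theorem pvCast_shr (n : Nat) (i : Nat) : ((n : Int) >>> i) = ((n >>> i : Nat) : Int) := by
  simp [Int.shiftRight_eq_div_pow, Nat.shiftRight_eq_div_pow]

theorem pvCast_shl (n : Nat) (i : Nat) : ((n : Int) <<< i) = ((n <<< i : Nat) : Int) := by
  simp only [Int.shiftLeft_eq, Nat.shiftLeft_eq]; push_cast; ring

theorem pvBitLength_eq_size (n : Nat) : PySem.Int.bitLength (n : Int) = n.size := by
  induction n using Nat.strong_induction_on with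
  | _ n ih =>
    rcases Nat.eq_zero_or_pos n with h | h
    · subst h; simp [PySem.Int.bitLength_zero]
    · rw [PySem.Int.bitLength_natCast h, ih (n / 2) (by omega)]
      rcases Nat.lt_or_ge n 2 with h2 | h2
      · have : n = 1 := by omega
        subst this
        norm_num [Nat.size_one, Nat.size_zero]
      · have hs2 : (n / 2).size = n.size - 1 := by
          have hpos : 0 < n.size := Nat.size_pos.2 (by omega)
          have hup : n / 2 < 2 ^ (n.size - 1) := by
            have h1 := Nat.lt_size_self n
            have : n < 2 ^ (n.size - 1) * 2 := by
              rw [← pow_succ]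
              have he : n.size - 1 + 1 = n.size := by omega
              rw [he]; exact h1
            omega
          have hlo : 2 ^ (n.size - 2) ≤ n / 2 := by
            have hpos2 : 2 ≤ n.size := by
              have : 1 < n.size := Nat.lt_size.mpr (by simpa using h2)
              omega
            have h1 : 2 ^ (n.size - 1) ≤ n := Nat.lt_size.mp (by omega)
            have he : 2 ^ (n.size - 2) * 2 = 2 ^ (n.size - 1) := by
              rw [← pow_succ]; congr 1; omega
            omega
          have hA : (n / 2).size ≤ n.size - 1 := Nat.size_le.mpr hup
          have hB : n.size - 2 < (n / 2).size := Nat.lt_size.mpr hlo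
          omega
        have hpos : 0 < n.size := Nat.size_pos.2 (by omega)
        omega

theorem pvSize_le_succ_self (n : Nat) : n.size ≤ n + 1 := by
  refine Nat.size_le.mpr ?_
  calc n < 2 ^ n := Nat.lt_two_pow_self
    _ ≤ 2 ^ (n + 1) := Nat.pow_le_pow_right (by norm_num) (by omega)

-- ---- Nat-level model of GF(2) carry-less arithmetic ----

def nmul (x y : Nat) : Nat :=
  if y = 0 then 0 else (if y % 2 = 1 then x else 0) ^^^ nmul (2 * x) (y / 2)
termination_by y
decreasing_by omega

theorem nmul_eq (x y : Nat) :
    nmul x y = if y = 0 then 0 else (if y % 2 = 1 then x else 0) ^^^ nmul (2 * x) (y / 2) := by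
  rw [nmul]

theorem nmul_zero (x : Nat) : nmul x 0 = 0 := by rw [nmul_eq]; simp

theorem nmul_one (x : Nat) : nmul x 1 = x := by
  rw [nmul_eq]; simp [nmul_zero]

theorem two_mul_xor (a b : Nat) : 2 * (a ^^^ b) = (2 * a) ^^^ (2 * b) := by
  have := @Nat.shiftLeft_xor_distrib 1 a b
  simpa [Nat.shiftLeft_eq, Nat.mul_comm] using this

theorem xor_mod_two (a b : Nat) : (a ^^^ b) % 2 = (a % 2 + b % 2) % 2 := by
  have h := Nat.testBit_xor a b 0
  simp only [Nat.testBit_zero] at h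
  rcases Nat.mod_two_eq_zero_or_one a with ha | ha <;>
    rcases Nat.mod_two_eq_zero_or_one b with hb | hb <;>
    simp [ha, hb] at h ⊢ <;> omega

theorem xor_div_two (a b : Nat) : (a ^^^ b) / 2 = a / 2 ^^^ b / 2 := by
  have := @Nat.shiftRight_xor_distrib 1 a b
  simpa [Nat.shiftRight_eq_div_pow] using this

theorem nmul_two_left (x y : Nat) : nmul (2 * x) y = 2 * nmul x y := by
  induction y using Nat.strong_induction_on generalizing x with
  | _ y ih =>
    rcases Nat.eq_zero_or_pos y with h | h
    · subst h; simp [nmul_zero]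
    · rw [nmul_eq (2 * x) y, nmul_eq x y]
      simp only [Nat.pos_iff_ne_zero.mp h, if_false]
      rw [two_mul_xor, ih (y / 2) (by omega) (2 * x)]
      rcases Nat.mod_two_eq_zero_or_one y with hy | hy <;> simp [hy]

theorem nmul_xor_left (a b y : Nat) : nmul (a ^^^ b) y = nmul a y ^^^ nmul b y := by
  induction y using Nat.strong_induction_on generalizing a b with
  | _ y ih =>
    rcases Nat.eq_zero_or_pos y with h | h
    · subst h; simp [nmul_zero]
    · rw [nmul_eq (a ^^^ b) y, nmul_eq a y, nmul_eq b y]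
      simp only [Nat.pos_iff_ne_zero.mp h, if_false]
      rw [two_mul_xor, ih (y / 2) (by omega)]
      rcases Nat.mod_two_eq_zero_or_one y with hy | hy <;>
        simp [hy, Nat.xor_assoc, Nat.xor_comm, Nat.xor_left_comm]

theorem nmul_xor_right (x a b : Nat) : nmul x (a ^^^ b) = nmul x a ^^^ nmul x b := by
  generalize hn : a + b = n
  induction n using Nat.strong_induction_on generalizing a b x with
  | _ n ih =>
    subst hn
    rcases Nat.eq_zero_or_pos a with ha | ha
    · subst ha; simp [nmul_zero]
    rcases Nat.eq_zero_or_pos b with hb | hb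
    · subst hb; simp [nmul_zero]
    by_cases hc : a ^^^ b = 0
    · rw [hc]
      have hab : a = b := Nat.xor_eq_zero_iff.mp hc
      subst hab; simp [nmul_zero]
    · rw [nmul_eq x (a ^^^ b), nmul_eq x a, nmul_eq x b]
      simp only [hc, Nat.pos_iff_ne_zero.mp ha, Nat.pos_iff_ne_zero.mp hb, if_false]
      rw [xor_div_two, ih (a / 2 + b / 2) (by omega) (2 * x) (a / 2) (b / 2) rfl]
      have hif : (if (a ^^^ b) % 2 = 1 then x else 0)
          = (if a % 2 = 1 then x else 0) ^^^ (if b % 2 = 1 then x else 0) := by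
        rw [xor_mod_two]
        rcases Nat.mod_two_eq_zero_or_one a with h1 | h1 <;>
          rcases Nat.mod_two_eq_zero_or_one b with h2 | h2 <;> simp [h1, h2]
      rw [hif]
      simp [Nat.xor_assoc, Nat.xor_comm, Nat.xor_left_comm]

theorem nmul_two_right (x q : Nat) : nmul x (2 * q) = 2 * nmul x q := by
  rcases Nat.eq_zero_or_pos q with h | h
  · subst h; simp [nmul_zero]
  · rw [nmul_eq x (2 * q)]
    have h1 : ¬ (2 * q = 0) := by omega
    have h2 : (2 * q) % 2 = 0 := by omega
    have h3 : 2 * q / 2 = q := by omega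
    simp [h1, h2, h3, nmul_two_left]

theorem size_two_mul {p : Nat} (hp : p ≠ 0) : (2 * p).size = p.size + 1 := by
  have := Nat.size_shiftLeft hp 1
  simpa [Nat.shiftLeft_eq, Nat.mul_comm] using this

theorem nmul_bounds (p q : Nat) (hp : p ≠ 0) (hq : q ≠ 0) :
    2 ^ (p.size + q.size - 2) ≤ nmul p q ∧ nmul p q < 2 ^ (p.size + q.size - 1) := by
  induction q using Nat.strong_induction_on generalizing p with
  | _ q ih =>
    have hps : 0 < p.size := Nat.size_pos.2 (Nat.pos_of_ne_zero hp)
    rcases Nat.lt_or_ge q 2 with h2 | h2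
    · have hq1 : q = 1 := by omega
      subst hq1
      rw [nmul_one]
      constructor
      · have he : p.size + Nat.size 1 - 2 = p.size - 1 := by rw [Nat.size_one]; omega
        rw [he]
        exact Nat.lt_size.mp (by omega)
      · have he : p.size + Nat.size 1 - 1 = p.size := by rw [Nat.size_one]; omega
        rw [he]; exact Nat.lt_size_self p
    · have hqs2 : 2 ≤ q.size := by
        have : 1 < q.size := Nat.lt_size.mpr (by simpa using h2)
        omega
      have hq2 : q / 2 ≠ 0 := by omega
      have hsz : (q / 2).size = q.size - 1 := by
        have hup : q / 2 < 2 ^ (q.size - 1) := by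
          have h1 := Nat.lt_size_self q
          have : q < 2 ^ (q.size - 1) * 2 := by
            rw [← pow_succ]
            have h3 : q.size - 1 + 1 = q.size := by omega
            rw [h3]; exact h1
          omega
        have hlo : 2 ^ (q.size - 2) ≤ q / 2 := by
          have h1 : 2 ^ (q.size - 1) ≤ q := Nat.lt_size.mp (by omega)
          have he : 2 ^ (q.size - 2) * 2 = 2 ^ (q.size - 1) := by rw [← pow_succ]; congr 1; omega
          omega
        have hA : (q / 2).size ≤ q.size - 1 := Nat.size_le.mpr hup
        have hB : q.size - 2 < (q / 2).size := Nat.lt_size.mpr hlo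
        omega
      have h2p : (2 * p) ≠ 0 := by omega
      have ihh := ih (q / 2) (by omega) (2 * p) h2p hq2
      rw [size_two_mul hp, hsz] at ihh
      have hidx1 : p.size + 1 + (q.size - 1) - 2 = p.size + q.size - 2 := by omega
      have hidx2 : p.size + 1 + (q.size - 1) - 1 = p.size + q.size - 1 := by omega
      rw [hidx1, hidx2] at ihh
      rw [nmul_eq]
      simp only [show ¬ q = 0 by omega, if_false]
      rcases Nat.mod_two_eq_zero_or_one q with hy | hy
      · simpa [hy] using ihh
      · simp only [hy, if_true, reduceIte]
        set M := nmul (2 * p) (q / 2)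
        set k := p.size + q.size - 2 with hk
        have hkk : p.size + q.size - 1 = k + 1 := by omega
        rw [hkk] at ihh ⊢
        have hplt : p < 2 ^ k := by
          have h1 := Nat.lt_size_self p
          calc p < 2 ^ p.size := h1
            _ ≤ 2 ^ k := Nat.pow_le_pow_right (by norm_num) (by omega)
        constructor
        · have hbit : (p ^^^ M).testBit k = true := by
            rw [Nat.testBit_xor, Nat.testBit_lt_two_pow hplt,
              pvNat_testBit_of_bounds ihh.1 ihh.2]
            rfl
          exact Nat.ge_two_pow_of_testBit hbit
        · exact Nat.xor_lt_two_pow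
            (lt_trans hplt (Nat.pow_lt_pow_right (by norm_num) (by omega))) ihh.2

def IsMult (p m : Nat) : Prop := ∃ q, m = nmul p q

theorem isMult_zero (p : Nat) : IsMult p 0 := ⟨0, (nmul_zero p).symm⟩

theorem isMult_self (p : Nat) : IsMult p p := ⟨1, (nmul_one p).symm⟩

theorem isMult_xor {p a b : Nat} (ha : IsMult p a) (hb : IsMult p b) : IsMult p (a ^^^ b) := by
  obtain ⟨qa, rfl⟩ := ha; obtain ⟨qb, rfl⟩ := hb
  exact ⟨qa ^^^ qb, (nmul_xor_right p qa qb).symm⟩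

theorem isMult_two {p m : Nat} (h : IsMult p m) : IsMult p (2 * m) := by
  obtain ⟨q, rfl⟩ := h
  exact ⟨2 * q, (nmul_two_right p q).symm⟩

theorem isMult_shl {p m : Nat} (h : IsMult p m) (i : Nat) : IsMult p (m <<< i) := by
  induction i with
  | zero => simpa [Nat.shiftLeft_eq] using h
  | succ i ih =>
    have h1 : m <<< (i+1) = 2 * (m <<< i) := by
      simp [Nat.shiftLeft_eq, pow_succ]; ring
    rw [h1]
    exact isMult_two ih

theorem isMult_nmul {p m : Nat} (h : IsMult p m) (y : Nat) : IsMult p (nmul m y) := by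
  induction y using Nat.strong_induction_on generalizing m with
  | _ y ih =>
    rcases Nat.eq_zero_or_pos y with hy | hy
    · subst hy; simpa [nmul_zero] using isMult_zero p
    · rw [nmul_eq]
      simp only [Nat.pos_iff_ne_zero.mp hy, if_false]
      refine isMult_xor ?_ (ih (y / 2) (by omega) (isMult_two h))
      rcases Nat.mod_two_eq_zero_or_one y with h1 | h1
      · simp only [h1]
        simpa using isMult_zero p
      · simpa [h1] using h

theorem reduced_unique {p r1 r2 : Nat} (hp : p ≠ 0) (h1 : r1 < 2 ^ (p.size - 1))
    (h2 : r2 < 2 ^ (p.size - 1)) (hm : IsMult p (r1 ^^^ r2)) : r1 = r2 := by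
  obtain ⟨q, hq⟩ := hm
  rcases Nat.eq_zero_or_pos q with h | h
  · subst h; rw [nmul_zero] at hq
    exact Nat.xor_eq_zero_iff.mp hq
  · exfalso
    have hlow : 2 ^ (p.size - 1) ≤ nmul p q := by
      refine le_trans ?_ (nmul_bounds p q hp (by omega)).1
      apply Nat.pow_le_pow_right (by norm_num)
      have : 0 < q.size := Nat.size_pos.2 h
      omega
    have := Nat.xor_lt_two_pow h1 h2
    omega

-- ---- Nat-level models of the two programs ----

def nLoopNoRed (z x y : Nat) : Nat :=
  if y = 0 then z else nLoopNoRed (if y % 2 = 1 then z ^^^ x else z) (2 * x) (y / 2)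
termination_by y
decreasing_by omega

theorem nLoopNoRed_eq (z x y : Nat) :
    nLoopNoRed z x y =
      if y = 0 then z else nLoopNoRed (if y % 2 = 1 then z ^^^ x else z) (2 * x) (y / 2) := by
  rw [nLoopNoRed]

theorem nLoopNoRed_spec (z x y : Nat) : nLoopNoRed z x y = z ^^^ nmul x y := by
  induction y using Nat.strong_induction_on generalizing z x with
  | _ y ih =>
    rcases Nat.eq_zero_or_pos y with h | h
    · subst h; rw [nLoopNoRed_eq]; simp [nmul_zero]
    · rw [nLoopNoRed_eq, nmul_eq]
      simp only [Nat.pos_iff_ne_zero.mp h, if_false]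
      rw [ih (y / 2) (by omega)]
      rcases Nat.mod_two_eq_zero_or_one y with h1 | h1 <;> simp [h1, Nat.xor_assoc]

def nRed (x p : Nat) : Nat :=
  if h : p ≠ 0 ∧ x >>> (p.size - 1) ≠ 0 then
    nRed (x ^^^ (p <<< (x.size - 1 - (p.size - 1)))) p
  else x
termination_by x
decreasing_by
  have hge : 2 ^ (p.size - 1) ≤ x := by
    have h1 := h.2
    rw [Nat.shiftRight_eq_div_pow] at h1
    have := Nat.div_pos_iff.mp (Nat.pos_of_ne_zero h1)
    omega
  have hlt := pvNat_red_step h.1 hge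
  have hx0 : x ≠ 0 := by
    intro hx; subst hx
    have : (0:Nat) < 2 ^ (p.size - 1) := by positivity
    omega
  have hle : 2 ^ (x.size - 1) ≤ x :=
    Nat.lt_size.mp (by have := Nat.size_pos.2 (Nat.pos_of_ne_zero hx0); omega)
  omega

theorem nRed_eq (x p : Nat) :
    nRed x p =
      if h : p ≠ 0 ∧ x >>> (p.size - 1) ≠ 0 then
        nRed (x ^^^ (p <<< (x.size - 1 - (p.size - 1)))) p
      else x := by
  rw [nRed]

theorem nRed_spec (x p : Nat) (hp : p ≠ 0) :
    nRed x p < 2 ^ (p.size - 1) ∧ IsMult p (nRed x p ^^^ x) := by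
  induction x using Nat.strong_induction_on with
  | _ x ih =>
    rw [nRed_eq]
    by_cases h : p ≠ 0 ∧ x >>> (p.size - 1) ≠ 0
    · rw [dif_pos h]
      have hge : 2 ^ (p.size - 1) ≤ x := by
        have h1 := h.2
        rw [Nat.shiftRight_eq_div_pow] at h1
        have := Nat.div_pos_iff.mp (Nat.pos_of_ne_zero h1)
        omega
      have hlt := pvNat_red_step h.1 hge
      have hx0 : x ≠ 0 := by
        intro hx; subst hx
        have : (0:Nat) < 2 ^ (p.size - 1) := by positivity
        omega
      have hle : 2 ^ (x.size - 1) ≤ x :=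
        Nat.lt_size.mp (by have := Nat.size_pos.2 (Nat.pos_of_ne_zero hx0); omega)
      set x' := x ^^^ (p <<< (x.size - 1 - (p.size - 1))) with hx'
      have ihh := ih x' (by omega)
      refine ⟨ihh.1, ?_⟩
      have hcomp : nRed x' p ^^^ x = (nRed x' p ^^^ x') ^^^ (x' ^^^ x) := by
        simp [Nat.xor_assoc, Nat.xor_comm, Nat.xor_left_comm, Nat.xor_self]
      rw [hcomp]
      refine isMult_xor ihh.2 ?_
      have he : x' ^^^ x = p <<< (x.size - 1 - (p.size - 1)) := by
        rw [hx', Nat.xor_comm x, Nat.xor_assoc, Nat.xor_self, Nat.xor_zero]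
      rw [he]
      exact isMult_shl (isMult_self p) _
    · rw [dif_neg h]
      have hz : x >>> (p.size - 1) = 0 := by
        by_contra hc
        exact h ⟨hp, hc⟩
      rw [Nat.shiftRight_eq_div_pow] at hz
      have hxlt : x < 2 ^ (p.size - 1) := by
        rcases Nat.div_eq_zero_iff.mp hz with h' | h'
        · exact absurd h' (Nat.pos_iff_ne_zero.mp (by positivity))
        · exact h'
      exact ⟨hxlt, by simpa [Nat.xor_self] using isMult_zero p⟩

def nLoopRed (z x y p : Nat) : Nat :=
  if y = 0 then z
  else
    nLoopRed (if y % 2 = 1 then z ^^^ x else z)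
      (if (2 * x) / 2 ^ (p.size - 1) % 2 = 1 then (2 * x) ^^^ p else 2 * x)
      (y / 2) p
termination_by y
decreasing_by omega

theorem nLoopRed_eq (z x y p : Nat) :
    nLoopRed z x y p =
      if y = 0 then z
      else
        nLoopRed (if y % 2 = 1 then z ^^^ x else z)
          (if (2 * x) / 2 ^ (p.size - 1) % 2 = 1 then (2 * x) ^^^ p else 2 * x)
          (y / 2) p := by
  rw [nLoopRed]

theorem step_red {p x1 : Nat} (hp : p ≠ 0) (hx1 : x1 < 2 ^ p.size) :
    (if x1 / 2 ^ (p.size - 1) % 2 = 1 then x1 ^^^ p else x1) < 2 ^ (p.size - 1) ∧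
    IsMult p ((if x1 / 2 ^ (p.size - 1) % 2 = 1 then x1 ^^^ p else x1) ^^^ x1) := by
  have hps : 0 < p.size := Nat.size_pos.2 (Nat.pos_of_ne_zero hp)
  have hk : p.size - 1 + 1 = p.size := by omega
  have htb : x1.testBit (p.size - 1) = decide (x1 / 2 ^ (p.size - 1) % 2 = 1) :=
    Nat.testBit_eq_decide_div_mod_eq
  by_cases hc : x1 / 2 ^ (p.size - 1) % 2 = 1
  · simp only [hc, if_true, reduceIte]
    constructor
    · refine pvNat_cancel (by rw [hk]; exact hx1) (by rw [hk]; exact Nat.lt_size_self p)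
        (by rw [htb]; simp [hc]) (pvNat_top_bit hp)
    · have he : (x1 ^^^ p) ^^^ x1 = p := by
        rw [Nat.xor_comm x1 p, Nat.xor_assoc, Nat.xor_self, Nat.xor_zero]
      rw [he]; exact isMult_self p
  · simp only [hc, if_false, reduceIte]
    constructor
    · refine pvNat_lt_of_testBit_false (by rw [hk]; exact hx1) ?_
      rw [htb]; simp [hc]
    · simpa [Nat.xor_self] using isMult_zero p

theorem nLoopRed_spec (z x y p : Nat) (hp : p ≠ 0) (hx : x < 2 ^ (p.size - 1)) :
    ∃ S, nLoopRed z x y p = z ^^^ S ∧ S < 2 ^ (p.size - 1) ∧ IsMult p (S ^^^ nmul x y) := by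
  induction y using Nat.strong_induction_on generalizing z x with
  | _ y ih =>
    have hps : 0 < p.size := Nat.size_pos.2 (Nat.pos_of_ne_zero hp)
    rcases Nat.eq_zero_or_pos y with h | h
    · subst h
      refine ⟨0, ?_, by positivity, by simpa [nmul_zero, Nat.xor_self] using isMult_zero p⟩
      rw [nLoopRed_eq]; simp
    · rw [nLoopRed_eq]
      simp only [Nat.pos_iff_ne_zero.mp h, if_false]
      have hx1 : 2 * x < 2 ^ p.size := by
        have he : (2:Nat) ^ (p.size - 1) * 2 = 2 ^ p.size := by
          rw [← pow_succ]; congr 1; omega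
        omega
      have hstep := step_red hp hx1
      obtain ⟨S', hS'eq, hS'lt, hS'mult⟩ :=
        ih (y / 2) (by omega) (if y % 2 = 1 then z ^^^ x else z)
          (if (2 * x) / 2 ^ (p.size - 1) % 2 = 1 then (2 * x) ^^^ p else 2 * x) hstep.1
      refine ⟨(if y % 2 = 1 then x else 0) ^^^ S', ?_, ?_, ?_⟩
      · rw [hS'eq]
        rcases Nat.mod_two_eq_zero_or_one y with h1 | h1 <;> simp [h1, Nat.xor_assoc]
      · refine Nat.xor_lt_two_pow ?_ hS'lt
        rcases Nat.mod_two_eq_zero_or_one y with h1 | h1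
        · simp only [h1]
          simpa using (by positivity : (0:Nat) < 2 ^ (p.size - 1))
        · simpa [h1] using hx
      · rw [nmul_eq]
        simp only [Nat.pos_iff_ne_zero.mp h, if_false]
        have hgoal : ((if y % 2 = 1 then x else 0) ^^^ S') ^^^
            ((if y % 2 = 1 then x else 0) ^^^ nmul (2 * x) (y / 2))
            = S' ^^^ nmul (2 * x) (y / 2) := by
          simp [Nat.xor_assoc, Nat.xor_comm, Nat.xor_left_comm, Nat.xor_self]
        rw [hgoal]
        have hdecomp : S' ^^^ nmul (2 * x) (y / 2)
            = (S' ^^^ nmul (if (2 * x) / 2 ^ (p.size - 1) % 2 = 1 then (2 * x) ^^^ p else 2 * x) (y / 2))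
              ^^^ (nmul (if (2 * x) / 2 ^ (p.size - 1) % 2 = 1 then (2 * x) ^^^ p else 2 * x) (y / 2)
                ^^^ nmul (2 * x) (y / 2)) := by
          simp [Nat.xor_assoc, Nat.xor_comm, Nat.xor_left_comm, Nat.xor_self]
        rw [hdecomp]
        refine isMult_xor hS'mult ?_
        rw [← nmul_xor_left]
        exact isMult_nmul hstep.2 (y / 2)

-- A-side Nat model of cl_div's loop and wrapper.
def ndivGo (p : Nat) : Nat → Nat → Nat
  | d, 0 => if d.testBit (p.size - 1) then d ^^^ p else d
  | d, (i+1) => ndivGo p (if d.testBit (i + p.size) then d ^^^ (p <<< (i+1)) else d) i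

def ndiv (d p : Nat) : Nat := if d.size < p.size then d else ndivGo p d (d.size - p.size)

theorem ndivGo_spec (p : Nat) (hp : p ≠ 0) :
    ∀ i d, d < 2 ^ (i + p.size) → ndivGo p d i < 2 ^ (p.size - 1) ∧ IsMult p (ndivGo p d i ^^^ d) := by
  have hps : 0 < p.size := Nat.size_pos.2 (Nat.pos_of_ne_zero hp)
  intro i
  induction i with
  | zero =>
    intro d hd
    simp only [ndivGo]
    have hk : p.size - 1 + 1 = p.size := by omega
    by_cases hb : d.testBit (p.size - 1)
    · simp only [hb, if_true, reduceIte]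
      refine ⟨pvNat_cancel (by rw [hk]; simpa using hd) (by rw [hk]; exact Nat.lt_size_self p)
        hb (pvNat_top_bit hp), ?_⟩
      have he : (d ^^^ p) ^^^ d = p := by
        rw [Nat.xor_comm d p, Nat.xor_assoc, Nat.xor_self, Nat.xor_zero]
      rw [he]; exact isMult_self p
    · simp only [Bool.not_eq_true] at hb
      simp only [hb, if_false, reduceIte]
      refine ⟨pvNat_lt_of_testBit_false (by rw [hk]; simpa using hd) hb, ?_⟩
      simpa [Nat.xor_self] using isMult_zero p
  | succ i ih =>
    intro d hd
    simp only [ndivGo]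
    have hd' : (if d.testBit (i + p.size) then d ^^^ (p <<< (i+1)) else d) < 2 ^ (i + p.size) := by
      by_cases hb : d.testBit (i + p.size)
      · simp only [hb, if_true, reduceIte]
        refine pvNat_cancel (k := i + p.size) (by
            have he : i + p.size + 1 = i + 1 + p.size := by omega
            rw [he]; exact hd) ?_ hb ?_
        · rw [Nat.shiftLeft_eq]
          calc p * 2 ^ (i+1) < 2 ^ p.size * 2 ^ (i+1) :=
                mul_lt_mul_of_pos_right (Nat.lt_size_self p) (by positivity)
            _ = 2 ^ (i + p.size + 1) := by rw [← pow_add]; congr 1; omega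
        · rw [Nat.testBit_shiftLeft]
          have h1 : i + p.size ≥ i + 1 := by omega
          have h2 : i + p.size - (i+1) = p.size - 1 := by omega
          simp [h1, h2, pvNat_top_bit hp]
      · simp only [Bool.not_eq_true] at hb
        simp only [hb, if_false, reduceIte]
        refine pvNat_lt_of_testBit_false (by
          have he : i + p.size + 1 = i + 1 + p.size := by omega
          rw [he]; exact hd) hb
    obtain ⟨hlt, hmult⟩ := ih _ hd'
    refine ⟨hlt, ?_⟩
    set d' := if d.testBit (i + p.size) then d ^^^ (p <<< (i+1)) else d with hd'def
    have hcomp : ndivGo p d' i ^^^ d = (ndivGo p d' i ^^^ d') ^^^ (d' ^^^ d) := by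
      simp [Nat.xor_assoc, Nat.xor_comm, Nat.xor_left_comm, Nat.xor_self]
    rw [hcomp]
    refine isMult_xor hmult ?_
    by_cases hb : d.testBit (i + p.size)
    · have he : d' ^^^ d = p <<< (i+1) := by
        simp only [hd'def, hb, if_true, reduceIte]
        rw [Nat.xor_comm d (p <<< (i+1)), Nat.xor_assoc, Nat.xor_self, Nat.xor_zero]
      rw [he]; exact isMult_shl (isMult_self p) _
    · have he : d' ^^^ d = 0 := by
        simp only [Bool.not_eq_true] at hb
        simp [hd'def, hb, Nat.xor_self]
      rw [he]; exact isMult_zero p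

theorem ndiv_spec (d p : Nat) (hp : p ≠ 0) :
    ndiv d p < 2 ^ (p.size - 1) ∧ IsMult p (ndiv d p ^^^ d) := by
  have hps : 0 < p.size := Nat.size_pos.2 (Nat.pos_of_ne_zero hp)
  rw [ndiv]
  by_cases h : d.size < p.size
  · simp only [h, if_true, reduceIte]
    refine ⟨?_, by simpa [Nat.xor_self] using isMult_zero p⟩
    calc d < 2 ^ d.size := Nat.lt_size_self d
      _ ≤ 2 ^ (p.size - 1) := Nat.pow_le_pow_right (by norm_num) (by omega)
  · simp only [h, if_false, reduceIte]
    refine ndivGo_spec p hp _ d ?_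
    calc d < 2 ^ d.size := Nat.lt_size_self d
      _ ≤ 2 ^ (d.size - p.size + p.size) := Nat.pow_le_pow_right (by norm_num) (by omega)

-- The Nat-level heart of the claim: long division of the full product equals the
-- interleaved reduced peasant loop.
theorem nat_main (x y p : Nat) (hp : p ≠ 0) :
    ndiv (nmul x y) p = nLoopRed 0 (nRed x p) y p := by
  obtain ⟨hr_lt, hr_mult⟩ := nRed_spec x p hp
  obtain ⟨S, hSeq, hSlt, hSmult⟩ := nLoopRed_spec 0 (nRed x p) y p hp hr_lt
  rw [hSeq, Nat.zero_xor]
  obtain ⟨hd_lt, hd_mult⟩ := ndiv_spec (nmul x y) p hp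
  refine reduced_unique hp hd_lt hSlt ?_
  have hmid : IsMult p (nmul (nRed x p) y ^^^ nmul x y) := by
    rw [← nmul_xor_left]
    exact isMult_nmul hr_mult y
  have hS2 : IsMult p (S ^^^ nmul x y) := by
    have he : S ^^^ nmul x y = (S ^^^ nmul (nRed x p) y) ^^^ (nmul (nRed x p) y ^^^ nmul x y) := by
      simp [Nat.xor_assoc, Nat.xor_comm, Nat.xor_left_comm, Nat.xor_self]
    rw [he]
    exact isMult_xor hSmult hmid
  have he : ndiv (nmul x y) p ^^^ S
      = (ndiv (nmul x y) p ^^^ nmul x y) ^^^ (S ^^^ nmul x y) := by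
    simp [Nat.xor_assoc, Nat.xor_comm, Nat.xor_left_comm, Nat.xor_self]
  rw [he]
  exact isMult_xor hd_mult hS2

-- ---- Int ↔ Nat bridges for the ports ----

theorem int_shl_shl (x : Int) (i : Nat) : (x <<< i) <<< (1:Nat) = x <<< (i+1) := by
  simp [Int.shiftLeft_eq, pow_succ]; ring

theorem int_shr_shr (y : Int) (i : Nat) : (y >>> i) >>> (1:Nat) = y >>> (i+1) := by
  simp only [Int.shiftRight_eq_div_pow]
  rw [Int.ediv_ediv_eq_ediv_mul (by positivity)]
  norm_num [pow_succ]

theorem band_testBit (d k : Nat) :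
    (PySem.Int.band (d : Int) ((1:Int) <<< k) ≠ 0) ↔ d.testBit k = true := by
  have h1 : ((1:Int) <<< k) = (((1 <<< k : Nat)) : Int) := by
    simpa using pvCast_shl 1 k
  rw [h1, PySem.Int.band_natCast, Nat.one_shiftLeft, Nat.and_two_pow]
  simp only [ne_eq, Int.natCast_eq_zero]
  by_cases h : d.testBit k <;> simp [h] <;> positivity

theorem band_one_mod (m : Nat) : (PySem.Int.band (m : Int) 1 ≠ 0) ↔ m % 2 = 1 := by
  have h2 : ((1:Int)) = (((1:Nat) : Int)) := by norm_num
  rw [h2, PySem.Int.band_natCast, Nat.and_one_is_mod]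
  simp only [ne_eq, Int.natCast_eq_zero]
  omega

theorem band_pow2_iff (y : Int) (i : Nat) (hy : 0 ≤ y) :
    (PySem.Int.band y ((1:Int) <<< i) ≠ 0) ↔ (PySem.Int.band (y >>> i) 1 ≠ 0) := by
  obtain ⟨yn, rfl⟩ : ∃ yn : Nat, y = (yn : Int) := ⟨y.toNat, by omega⟩
  rw [band_testBit, pvCast_shr, band_one_mod, Nat.shiftRight_eq_div_pow,
    Nat.testBit_eq_decide_div_mod_eq]
  simp

-- Loop fusion on the A side: cl_mult's indexed loop is the peasant loop on shifted
-- state, fuel for fuel.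
theorem clMult_fuse (x y : Int) (f : Nat) :
    ∀ (i : Nat) (z : Int), pvClMultAux x y i z f = pvLoopNoRed z (x <<< i) (y >>> i) f := by
  induction f with
  | zero => intro i z; rfl
  | succ f ih =>
    intro i z
    show (if 0 < y >>> i then _ else z) = (if 0 < y >>> i then _ else z)
    by_cases h : 0 < y >>> i
    · have hy : 0 ≤ y := le_of_lt (pvInt_shr_pos h)
      rw [if_pos h, if_pos h]
      have hbit := band_pow2_iff y i hy
      rw [ih (i+1), int_shl_shl, int_shr_shr]
      by_cases hb : PySem.Int.band y ((1:Int) <<< i) ≠ 0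
      · rw [if_pos hb, if_pos (hbit.mp hb)]
      · rw [if_neg hb, if_neg (fun hc => hb (hbit.mpr hc))]
    · rw [if_neg h, if_neg h]

theorem loopNoRed_cast (f : Nat) :
    ∀ (z x y : Nat), y < 2 ^ f →
      pvLoopNoRed (z : Int) (x : Int) (y : Int) f = ((nLoopNoRed z x y : Nat) : Int) := by
  induction f with
  | zero =>
    intro z x y hy
    have : y = 0 := by omega
    subst this
    rw [nLoopNoRed_eq]
    simp [pvLoopNoRed]
  | succ f ih =>
    intro z x y hy
    rw [nLoopNoRed_eq]
    show (if (0:Int) < (y:Int) then _ else _) = _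
    by_cases h : y = 0
    · subst h; simp
    · have h0 : (0:Int) < (y : Int) := by exact_mod_cast Nat.pos_of_ne_zero h
      rw [if_pos h0, if_neg h]
      have hshl : (x : Int) <<< (1:Nat) = ((2 * x : Nat) : Int) := by
        have he : x <<< 1 = 2 * x := by rw [Nat.shiftLeft_eq, Nat.mul_comm]
        rw [pvCast_shl, he]
      have hshr : (y : Int) >>> (1:Nat) = ((y / 2 : Nat) : Int) := by
        have he : y >>> 1 = y / 2 := by rw [Nat.shiftRight_eq_div_pow, pow_one]
        rw [pvCast_shr, he]
      have hyf : y / 2 < 2 ^ f := by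
        rw [pow_succ] at hy; omega
      rw [hshl, hshr]
      by_cases hc : y % 2 = 1
      · rw [if_pos ((band_one_mod y).mpr hc), if_pos hc, PySem.Int.bxor_natCast]
        exact ih _ _ _ hyf
      · rw [if_neg (fun hx => hc ((band_one_mod y).mp hx)), if_neg hc]
        exact ih _ _ _ hyf

theorem reduceX_cast (p : Nat) (hp : p ≠ 0) (f : Nat) :
    ∀ (x : Nat), x < 2 ^ f → pvReduceX (x : Int) (p : Int) f = ((nRed x p : Nat) : Int) := by
  induction f with
  | zero =>
    intro x hx
    have : x = 0 := by omega
    subst this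
    rw [nRed_eq]
    have hz : (0:Nat) >>> (p.size - 1) = 0 := by simp
    rw [dif_neg (fun hc => hc.2 hz)]
    rfl
  | succ f ih =>
    intro x hx
    rw [nRed_eq]
    show (if 0 < (x:Int) >>> (PySem.Int.bitLength (p:Int) - 1) then _ else _) = _
    rw [pvBitLength_eq_size]
    by_cases h : x >>> (p.size - 1) ≠ 0
    · have hInt : 0 < (x : Int) >>> (p.size - 1) := by
        rw [pvCast_shr]
        exact_mod_cast Nat.pos_of_ne_zero h
      rw [if_pos hInt, dif_pos ⟨hp, h⟩]
      rw [pvBitLength_eq_size, pvCast_shl, PySem.Int.bxor_natCast]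
      have hge : 2 ^ (p.size - 1) ≤ x := by
        have h1 := h
        rw [Nat.shiftRight_eq_div_pow] at h1
        have := Nat.div_pos_iff.mp (Nat.pos_of_ne_zero h1)
        omega
      have hlt := pvNat_red_step hp hge
      have hx0 : x ≠ 0 := by
        intro hx'; subst hx'
        have : (0:Nat) < 2 ^ (p.size - 1) := by positivity
        omega
      have hsz : x.size ≤ f + 1 := Nat.size_le.mpr hx
      refine ih _ ?_
      calc x ^^^ (p <<< (x.size - 1 - (p.size - 1))) < 2 ^ (x.size - 1) := hlt
        _ ≤ 2 ^ f := Nat.pow_le_pow_right (by norm_num) (by omega)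
    · have hInt : ¬ (0 < (x : Int) >>> (p.size - 1)) := by
        rw [pvCast_shr]
        simp only [not_not] at h
        simp [h]
      rw [if_neg hInt, dif_neg (fun hc => h hc.2)]

theorem loopB_cast (p : Nat) (f : Nat) :
    ∀ (z x y : Nat), y < 2 ^ f →
      pvLoopB (z : Int) (x : Int) (y : Int) (p : Int) (p.size - 1) f = ((nLoopRed z x y p : Nat) : Int) := by
  induction f with
  | zero =>
    intro z x y hy
    have : y = 0 := by omega
    subst this
    rw [nLoopRed_eq]
    simp [pvLoopB]
  | succ f ih =>
    intro z x y hy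
    rw [nLoopRed_eq]
    show (if (0:Int) < (y:Int) then _ else _) = _
    by_cases h : y = 0
    · subst h; simp
    · have h0 : (0:Int) < (y : Int) := by exact_mod_cast Nat.pos_of_ne_zero h
      rw [if_pos h0, if_neg h]
      have hshl : (x : Int) <<< (1:Nat) = ((2 * x : Nat) : Int) := by
        have he : x <<< 1 = 2 * x := by rw [Nat.shiftLeft_eq, Nat.mul_comm]
        rw [pvCast_shl, he]
      have hshr : (y : Int) >>> (1:Nat) = ((y / 2 : Nat) : Int) := by
        have he : y >>> 1 = y / 2 := by rw [Nat.shiftRight_eq_div_pow, pow_one]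
        rw [pvCast_shr, he]
      have hb2 : (PySem.Int.band (((2 * x : Nat) : Int) >>> (p.size - 1)) 1 ≠ 0)
          ↔ (2 * x) / 2 ^ (p.size - 1) % 2 = 1 := by
        rw [pvCast_shr, band_one_mod, Nat.shiftRight_eq_div_pow]
      have hyf : y / 2 < 2 ^ f := by
        rw [pow_succ] at hy; omega
      simp only [hshl, hshr]
      by_cases hcx : (2 * x) / 2 ^ (p.size - 1) % 2 = 1
      · rw [if_pos (hb2.mpr hcx), if_pos hcx, PySem.Int.bxor_natCast]
        by_cases hc : y % 2 = 1
        · rw [if_pos ((band_one_mod y).mpr hc), if_pos hc, PySem.Int.bxor_natCast]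
          exact ih _ _ _ hyf
        · rw [if_neg (fun hx => hc ((band_one_mod y).mp hx)), if_neg hc]
          exact ih _ _ _ hyf
      · rw [if_neg (fun hx => hcx (hb2.mp hx)), if_neg hcx]
        by_cases hc : y % 2 = 1
        · rw [if_pos ((band_one_mod y).mpr hc), if_pos hc, PySem.Int.bxor_natCast]
          exact ih _ _ _ hyf
        · rw [if_neg (fun hx => hc ((band_one_mod y).mp hx)), if_neg hc]
          exact ih _ _ _ hyf

theorem pvBitLenAux_cast (n : Nat) :
    ∀ (f b : Nat), n.size ≤ b + f → pvBitLenAux (n : Int) b f = max b n.size := by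
  intro f
  induction f with
  | zero =>
    intro b hb
    simp only [pvBitLenAux]
    omega
  | succ f ih =>
    intro b hb
    show (if 0 < (n:Int) >>> b then pvBitLenAux (n:Int) (b+1) f else b) = _
    by_cases h : b < n.size
    · have hpos : 0 < (n : Int) >>> b := by
        rw [pvCast_shr]
        have h1 : 2 ^ b ≤ n := Nat.lt_size.mp h
        have h2 : 0 < n >>> b := by
          rw [Nat.shiftRight_eq_div_pow]
          exact Nat.div_pos h1 (by positivity)
        exact_mod_cast h2
      rw [if_pos hpos, ih (b+1) (by omega)]
      omega
    · have hneg : ¬ (0 < (n : Int) >>> b) := by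
        rw [pvCast_shr]
        have h1 : n < 2 ^ b := Nat.size_le.mp (by omega)
        have h2 : n >>> b = 0 := by
          rw [Nat.shiftRight_eq_div_pow]
          exact Nat.div_eq_of_lt h1
        simp [h2]
      rw [if_neg hneg]
      omega

-- cl_div's descending fold equals the Nat model ndivGo.
theorem clDivFold (p : Nat) (hp : 0 < p) :
    ∀ (k : Nat) (d : Nat),
      List.foldl
        (fun d i =>
          if PySem.Int.band d ((1:Int) <<< (i + ((p.size : Nat) : Int) - 1).toNat) ≠ 0 then
            PySem.Int.bxor d ((p : Int) <<< i.toNat)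
          else d)
        (d : Int) (PySem.List.pyRange ((k : Nat) : Int) (-1) (-1))
        = ((ndivGo p d k : Nat) : Int) := by
  have hps : 0 < p.size := Nat.size_pos.2 hp
  intro k
  induction k with
  | zero =>
    intro d
    rw [PySem.List.pyRange_neg_one_cons (by norm_num)]
    have he0 : (((0:Nat) : Int) - 1) = (-1 : Int) := by norm_num
    rw [he0]
    have hnil : PySem.List.pyRange (-1) (-1) (-1) = [] := by decide
    rw [hnil]
    simp only [List.foldl_cons, List.foldl_nil]
    have he1 : ((((0:Nat)) : Int) + ((p.size : Nat) : Int) - 1).toNat = p.size - 1 := by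
      push_cast; omega
    have he2 : (((0:Nat) : Int)).toNat = 0 := by norm_num
    rw [he1, he2]
    have he3 : ((p : Int) <<< (0:Nat)) = (p : Int) := by
      simp [Int.shiftLeft_eq]
    rw [he3]
    simp only [ndivGo]
    by_cases hb : d.testBit (p.size - 1)
    · rw [if_pos ((band_testBit d (p.size - 1)).mpr hb), if_pos hb, PySem.Int.bxor_natCast]
    · rw [if_neg (fun hc => by simp [(band_testBit d (p.size - 1)).mp hc] at hb), if_neg hb]
  | succ k ih =>
    intro d
    have hlt : (-1 : Int) < (((k+1:Nat)) : Int) := by push_cast; omega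
    rw [PySem.List.pyRange_neg_one_cons hlt]
    have he0 : ((((k+1):Nat) : Int) - 1) = ((k : Nat) : Int) := by push_cast; omega
    rw [he0]
    simp only [List.foldl_cons]
    have he1 : (((((k+1):Nat)) : Int) + ((p.size : Nat) : Int) - 1).toNat = k + p.size := by
      push_cast; omega
    have he2 : ((((k+1):Nat) : Int)).toNat = k + 1 := by norm_num
    rw [he1, he2]
    simp only [ndivGo]
    by_cases hb : d.testBit (k + p.size)
    · rw [if_pos ((band_testBit d (k + p.size)).mpr hb), if_pos hb, pvCast_shl,
        PySem.Int.bxor_natCast]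
      exact ih _
    · rw [if_neg (fun hc => by simp [(band_testBit d (k + p.size)).mp hc] at hb), if_neg hb]
      exact ih _

theorem clDiv_cast (d p : Nat) (hp : 0 < p) :
    pvClDiv (d : Int) (p : Int) = ((ndiv d p : Nat) : Int) := by
  rw [pvClDiv, ndiv]
  have ht1 : ((d : Int)).toNat = d := by norm_num
  have ht2 : ((p : Int)).toNat = p := by norm_num
  rw [ht1, ht2]
  have hb1 : pvBitLenAux (d : Int) 0 (d + 1) = max 0 d.size :=
    pvBitLenAux_cast d (d + 1) 0 (by have := pvSize_le_succ_self d; omega)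
  have hb2 : pvBitLenAux (p : Int) 0 (p + 1) = max 0 p.size :=
    pvBitLenAux_cast p (p + 1) 0 (by have := pvSize_le_succ_self p; omega)
  rw [hb1, hb2, Nat.zero_max, Nat.zero_max]
  by_cases h : d.size < p.size
  · rw [if_pos (by exact_mod_cast h), if_pos h]
  · rw [if_neg (by exact_mod_cast h), if_neg h]
    have he : ((d.size : Nat) : Int) - ((p.size : Nat) : Int) = (((d.size - p.size : Nat)) : Int) := by
      push_cast; omega
    rw [he]
    exact clDivFold p hp (d.size - p.size) d

-- ===== VERDICT (by name: the statement is the Claim_ definition above) =====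
theorem gf_mult_noLUT_spec : Claim_equal_gf_mult_noLUT := by
  intro x y prim _ hpre
  unfold Spec_gf_mult_noLUT
  show gf_mult_noLUT x y prim = gf_mult_noLUT_alt x y prim
  simp only [gf_mult_noLUT, gf_mult_noLUT_alt]
  have hx0 : x <<< (0:Nat) = x := by simp [Int.shiftLeft_eq]
  have hy0 : y >>> (0:Nat) = y := by simp [Int.shiftRight_eq_div_pow]
  by_cases hy : 0 < y
  · by_cases hp : 0 < prim
    · have hx : 0 ≤ x := by
        rcases hpre with h | h | h
        · exact h
        · omega
        · omega
      obtain ⟨xn, rfl⟩ : ∃ xn : Nat, x = (xn : Int) := ⟨x.toNat, by omega⟩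
      obtain ⟨yn, rfl⟩ : ∃ yn : Nat, y = (yn : Int) := ⟨y.toNat, by omega⟩
      obtain ⟨pn, rfl⟩ : ∃ pn : Nat, prim = (pn : Int) := ⟨prim.toNat, by omega⟩
      have hpn : 0 < pn := by omega
      have htn : ∀ m : Nat, ((m : Int)).toNat = m := fun m => by norm_num
      have hflt : ∀ m : Nat, m < 2 ^ (m + 1) := fun m =>
        lt_of_lt_of_le Nat.lt_two_pow_self (Nat.pow_le_pow_right (by norm_num) (by omega))
      have hA : pvClMultAux (xn : Int) (yn : Int) 0 0 (((yn : Int)).toNat + 1)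
          = ((nmul xn yn : Nat) : Int) := by
        rw [htn yn, clMult_fuse, hx0, hy0]
        have hz : (0 : Int) = (((0:Nat)) : Int) := by norm_num
        rw [hz, loopNoRed_cast (yn + 1) 0 xn yn (hflt yn), nLoopNoRed_spec, Nat.zero_xor]
      rw [hA, if_pos (by exact_mod_cast hpn), clDiv_cast _ _ hpn]
      rw [if_pos ⟨by exact_mod_cast hpn, hy⟩]
      rw [htn xn, htn yn]
      rw [reduceX_cast pn (by omega) (xn + 1) xn (hflt xn), pvBitLength_eq_size]
      have hz : (0 : Int) = (((0:Nat)) : Int) := by norm_num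
      rw [hz, loopB_cast pn (yn + 1) 0 (nRed xn pn) yn (hflt yn)]
      exact_mod_cast congrArg (fun t => ((t : Nat) : Int)) (nat_main xn yn pn (by omega))
    · rw [if_neg (by omega), if_neg (fun hc => hp hc.1)]
      rw [clMult_fuse, hx0, hy0]
  · -- y ≤ 0 : both sides are 0
    have hyt : y.toNat = 0 := by omega
    have hA0 : pvClMultAux x y 0 0 (y.toNat + 1) = 0 := by
      rw [hyt]
      simp only [pvClMultAux]
      rw [if_neg (by rw [hy0]; exact hy)]
    have hB0 : pvLoopNoRed 0 x y (y.toNat + 1) = 0 := by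
      rw [hyt]
      simp only [pvLoopNoRed]
      rw [if_neg hy]
    have hnc : ¬ (0 < prim ∧ 0 < y) := fun hc => hy hc.2
    rw [hA0, hB0, if_neg hnc]
    by_cases hp : prim > 0
    · rw [if_pos hp]
      obtain ⟨pn, rfl⟩ : ∃ pn : Nat, prim = (pn : Int) := ⟨prim.toNat, by omega⟩
      have hz : (0 : Int) = (((0:Nat)) : Int) := by norm_num
      rw [hz, clDiv_cast 0 pn (by exact_mod_cast hp)]
      rw [ndiv]
      have : Nat.size 0 < pn.size := by
        simpa [Nat.size_zero] using Nat.size_pos.2 (by exact_mod_cast hp)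
      rw [if_pos this]
    · rw [if_neg hp]
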